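-- pv_equiv track=rewrite | github.com/ghantoos/lshell | lshell/sec.py | _read_backtick_expansion
-- ===== SOURCE A (Python) =====
-- def _read_backtick_expansion(line, start):
--     """Read a backtick expansion beginning at start and return (end, body)."""
--     i = start + 1
--     escaped = False
--     while i < len(line):
--         char = line[i]
--         if escaped:
--             escaped = False
--             i += 1
--             continue
--         if char == "\\":
--             escaped = True
--             i += 1
--             continue
--         if char == "`":
--             return i + 1, line[start + 1 : i]
--         i += 1
--     return None, None
-- ===== SOURCE B (Python) =====
-- import re
--
-- # Declarative version: the escape-tracking scan is a single regex match.
-- _BODY = re.compile(r'(?:\\.|[^`\\])*', re.DOTALL)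
--
--
-- def _read_backtick_expansion(line, start):
--     """Read a backtick expansion beginning at start and return (end, body)."""
--     m = _BODY.match(line, start + 1)
--     e = m.end()
--     if e < len(line) and line[e] == "`":
--         return e + 1, line[start + 1:e]
--     return None, None
-- ===== Notes on version B (the rewrite author's own statement) =====
-- stated objective: idiomatic
-- what changed: The hand-written while-loop with an 'escaped' flag is replaced by one anchored regex match (?:\\.|[^`\\])* whose end position is checked for the closing backtick.
-- outside the precondition, e.g. on _read_backtick_expansion('ab`', -4): A returns (0, 'ab'), B returns (3, 'ab'); on _read_backtick_expansion('abc', -10): A raises IndexError, B returns (None, None)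
import Mathlib
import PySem

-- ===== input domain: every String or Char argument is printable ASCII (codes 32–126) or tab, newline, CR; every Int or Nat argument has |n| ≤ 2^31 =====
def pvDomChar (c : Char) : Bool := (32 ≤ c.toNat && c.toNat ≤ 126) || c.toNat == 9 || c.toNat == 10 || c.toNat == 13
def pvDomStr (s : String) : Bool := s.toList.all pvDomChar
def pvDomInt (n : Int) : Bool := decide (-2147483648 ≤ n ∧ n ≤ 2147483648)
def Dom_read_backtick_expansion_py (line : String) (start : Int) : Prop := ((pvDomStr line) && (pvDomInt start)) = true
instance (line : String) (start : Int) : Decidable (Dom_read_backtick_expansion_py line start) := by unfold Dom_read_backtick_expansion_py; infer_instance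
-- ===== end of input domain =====

-- B replaces A's hand-written escape-tracking while-loop by one anchored regex match; equivalence is claimed for start ≥ -1 (no negative-index wraparound).

-- ===== PORT A =====
-- A's while-loop: state (i, escaped); fuel = number of remaining positions, len - i
def pvLoopA (cs : List Char) (startp1 : Int) (i : Int) (escaped : Bool) : Nat → Option Int × Option String
  | 0 => (none, none)
  | fuel + 1 =>
    if i < (cs.length : Int) then
      match PySem.List.pyGet? cs i with
      | none => (none, none)   -- IndexError (unreachable for i ≥ 0): outside Pre_
      | some char =>
        if escaped then pvLoopA cs startp1 (i + 1) false fuel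
        else if char = '\\' then pvLoopA cs startp1 (i + 1) true fuel
        else if char = '`' then
          (some (i + 1), some (String.mk (PySem.List.slice cs (some (startp1)) (some i))))
        else pvLoopA cs startp1 (i + 1) false fuel
    else (none, none)

def read_backtick_expansion_py (line : String) (start : Int) : Option Int × Option String :=
  let cs := line.toList
  pvLoopA cs (start + 1) (start + 1) false ((cs.length : Int) - (start + 1)).toNat

-- ===== PORT B =====
-- greedy length of the regex (?:\\.|[^`\\])* on a suffix: '\\.' consumes 2, '[^`\\]' consumes 1
def pvBodyLen : List Char → Nat
  | '\\' :: _ :: rest => 2 + pvBodyLen rest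
  | c :: rest => if c = '`' || c = '\\' then 0 else 1 + pvBodyLen rest
  | [] => 0

def read_backtick_expansion_py_alt (line : String) (start : Int) : Option Int × Option String :=
  let cs := line.toList
  -- re.match clamps the match position into [0, len]
  let p : Nat := min (max (start + 1) 0).toNat cs.length
  let e : Nat := p + pvBodyLen (cs.drop p)
  if e < cs.length ∧ cs[e]? = some '`' then
    (some ((e : Int) + 1), some (String.mk (PySem.List.slice cs (some (start + 1)) (some (e : Int)))))
  else (none, none)

-- ===== PRECONDITION & SPEC =====
-- Pre_ excludes start < -1, where A either raises IndexError (start+1 < -len(line)) or scans through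
-- Python's negative-index wraparound, an artefact of its implementation; B matches from true positions.
def Pre_read_backtick_expansion_py (line : String) (start : Int) : Prop := -1 ≤ start
instance (line : String) (start : Int) : Decidable (Pre_read_backtick_expansion_py line start) := by unfold Pre_read_backtick_expansion_py; infer_instance
def pvWitness_read_backtick_expansion_py : String × Int := ("`ls -l`", 0)
def Spec_read_backtick_expansion_py (line : String) (start : Int) (out : Option Int × Option String) : Prop := out = read_backtick_expansion_py_alt line start
instance (line : String) (start : Int) (out : Option Int × Option String) : Decidable (Spec_read_backtick_expansion_py line start out) := by unfold Spec_read_backtick_expansion_py; infer_instance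

-- ===== CLAIM (what is proved, stated in full; the proofs are below) =====
def Claim_equal_read_backtick_expansion_py : Prop := ∀ (line : String) (start : Int), Dom_read_backtick_expansion_py line start → Pre_read_backtick_expansion_py line start → Spec_read_backtick_expansion_py line start (read_backtick_expansion_py line start)

-- ===== LEMMAS AND PROOFS =====

-- A's loop from position i (escaped = false) lands exactly where the regex's greedy match ends.
theorem pvLoopA_eq (cs : List Char) (startp1 : Int) : ∀ (n i : Nat), cs.length - i = n → i ≤ cs.length →
    pvLoopA cs startp1 (i : Int) false n =
      (let e := i + pvBodyLen (cs.drop i);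
       if e < cs.length ∧ cs[e]? = some '`' then
         (some ((e : Int) + 1), some (String.mk (PySem.List.slice cs (some startp1) (some (e : Int)))))
       else (none, none)) := by
  intro n
  induction n using Nat.strong_induction_on with
  | _ n ih =>
    intro i hn hi
    rcases hd : cs.drop i with _ | ⟨c, rest⟩
    · -- i = len
      have hlen : i = cs.length := by
        have := congrArg List.length hd; simp [List.length_drop] at this; omega
      have hn0 : n = 0 := by omega
      subst hn0
      simp [pvLoopA, pvBodyLen, hlen]
    · have hilt : i < cs.length := by
        have := congrArg List.length hd; simp [List.length_drop] at this; omega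
      have hci : cs[i]? = some c := by
        have : (cs.drop i)[0]? = some c := by simp [hd]
        simpa using this
      by_cases hc : c = '\\'
      · subst hc
        rcases hrest : rest with _ | ⟨d, rest'⟩
        · -- lone backslash at end
          have hlen : i + 1 = cs.length := by
            have := congrArg List.length hd; simp [List.length_drop, hrest] at this; omega
          obtain ⟨m, rfl⟩ : ∃ m, n = m + 1 := ⟨n - 1, by omega⟩
          have hm : m = 0 := by omega
          subst hm
          simp only [pvLoopA]
          rw [if_pos (by exact_mod_cast hilt)]
          simp only [PySem.List.pyGet?_natCast, hci]
          simp [pvBodyLen, hci]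
        · -- escaped pair
          subst hrest
          have hdrop1 : cs.drop (i+1) = d :: rest' := by
            have := congrArg List.tail hd; rwa [List.tail_drop] at this
          have hdrop2 : cs.drop (i+2) = rest' := by
            have := congrArg List.tail hdrop1; rwa [List.tail_drop] at this
          have hilt1 : i + 1 < cs.length := by
            have := congrArg List.length hdrop1; simp [List.length_drop] at this; omega
          have hci1 : cs[i+1]? = some d := by
            have : (cs.drop (i+1))[0]? = some d := by simp [hdrop1]
            simpa using this
          obtain ⟨m, rfl⟩ : ∃ m, n = m + 2 := ⟨n - 2, by omega⟩
          have step : pvLoopA cs startp1 (i : Int) false (m + 2) = pvLoopA cs startp1 ((i+2 : Nat) : Int) false m := by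
            have c1 : ((i : Int) < (cs.length : Int)) := by exact_mod_cast hilt
            have c2 : ((i : Int) + 1 < (cs.length : Int)) := by exact_mod_cast hilt1
            have e2 : PySem.List.pyGet? cs ((i : Int) + 1) = some d := by
              rw [show (i : Int) + 1 = ((i+1 : Nat) : Int) by push_cast; ring, PySem.List.pyGet?_natCast]
              exact hci1
            simp only [pvLoopA, PySem.List.pyGet?_natCast, hci, e2, if_pos c1, if_pos c2]
            simp [show ((i : Int) + 1 + 1) = ((i+2 : Nat) : Int) by push_cast; ring]
          rw [step, ih m (by omega) (i+2) (by omega) (by omega)]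
          simp only [hdrop2, pvBodyLen]
          have : i + 2 + pvBodyLen rest' = i + (2 + pvBodyLen rest') := by omega
          rw [this]
      · -- not a backslash
        have hbody : pvBodyLen (c :: rest) = if c = '`' || c = '\\' then 0 else 1 + pvBodyLen rest := by
          rcases rest with _ | ⟨d, rest'⟩
          · simp [pvBodyLen, hc]
          · rw [pvBodyLen.eq_def]
            simp [hc]
        by_cases hbt : c = '`'
        · subst hbt
          obtain ⟨m, rfl⟩ : ∃ m, n = m + 1 := ⟨n - 1, by omega⟩
          have hb0 : pvBodyLen ('`' :: rest) = 0 := by rw [hbody]; simp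
          have hgi : cs[i] = '`' := by
            have h2 := hci; rw [List.getElem?_eq_getElem hilt] at h2; exact Option.some.inj h2
          simp only [pvLoopA]
          rw [if_pos (by exact_mod_cast hilt)]
          simp only [PySem.List.pyGet?_natCast, hci]
          simp [hb0, hilt, hgi]
        · obtain ⟨m, rfl⟩ : ∃ m, n = m + 1 := ⟨n - 1, by omega⟩
          have hdrop1 : cs.drop (i+1) = rest := by
            have := congrArg List.tail hd; rwa [List.tail_drop] at this
          have step : pvLoopA cs startp1 (i : Int) false (m + 1) = pvLoopA cs startp1 ((i+1 : Nat) : Int) false m := by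
            simp only [pvLoopA]
            rw [if_pos (by exact_mod_cast hilt)]
            simp only [PySem.List.pyGet?_natCast, hci]
            rw [show (i : Int) + 1 = ((i+1 : Nat) : Int) by push_cast; ring]
            simp [hc, hbt]
          rw [step, ih m (by omega) (i+1) (by omega) (by omega)]
          have hb1 : pvBodyLen (c :: rest) = 1 + pvBodyLen rest := by
            rw [hbody]; simp [hc, hbt]
          simp only [hdrop1, hb1]
          have harith : i + 1 + pvBodyLen rest = i + (1 + pvBodyLen rest) := by omega
          rw [harith]

-- ===== VERDICT (by name: the statement is the Claim_ definition above) =====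
theorem read_backtick_expansion_py_spec : Claim_equal_read_backtick_expansion_py := by
  intro line start _hdom hpre
  have hpre' : (0 : Int) ≤ start + 1 := by
    unfold Pre_read_backtick_expansion_py at hpre; omega
  simp only [Spec_read_backtick_expansion_py, read_backtick_expansion_py, read_backtick_expansion_py_alt]
  generalize line.toList = cs
  by_cases hle : start + 1 ≤ (cs.length : Int)
  · have hi : start + 1 = (((start + 1).toNat : Nat) : Int) := by omega
    have hfuel : ((cs.length : Int) - (start + 1)).toNat = cs.length - (start + 1).toNat := by omega
    have hp : min (max (start + 1) 0).toNat cs.length = (start + 1).toNat := by omega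
    rw [hfuel, hp]
    rw [hi]
    exact pvLoopA_eq cs (((start + 1).toNat : Nat) : Int) (cs.length - (start + 1).toNat) (start + 1).toNat rfl (by omega)
  · have hfuel : ((cs.length : Int) - (start + 1)).toNat = 0 := by omega
    have hp : min (max (start + 1) 0).toNat cs.length = cs.length := by omega
    rw [hfuel, hp]
    simp [pvLoopA, pvBodyLen, List.drop_length]
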